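-- pv_equiv track=rewrite | github.com/Matty-7/ECE590 | HW6/eqsubstr.py | matching_length_sub_strs
-- ===== SOURCE A (Python) =====
-- from collections import defaultdict
--
-- def matching_length_sub_strs(s, c1, c2):
--
--     c1_ranges = defaultdict(list)
--     c2_ranges = defaultdict(list)
--
--     def find_ranges(char):
--         ranges = defaultdict(list)
--         i = 0
--         n = len(s)
--         while i < n:
--             if s[i] == char:
--                 start = i
--                 while i < n and s[i] == char:
--                     i += 1
--                 length = i - start
--                 ranges[length].append(start)
--             else:
--                 i += 1
--         return ranges
--
--     c1_ranges = find_ranges(c1)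
--     c2_ranges = find_ranges(c2)
--
--     # The set of matching tuples
--     result = set()
--
--     # For each length that exists in both c1 and c2 ranges
--     for length in c1_ranges:
--         if length in c2_ranges:
--             # Create all possible combinations of starting indices
--             c1_starts = c1_ranges[length]
--             c2_starts = c2_ranges[length]
--             # Use list comprehension for faster execution
--             result.update({(c1_start, c2_start, length) for c1_start in c1_starts for c2_start in c2_starts})
--
--     return result
-- ===== SOURCE B (Python) =====
-- def matching_length_sub_strs(s, c1, c2):
--     # One pass over s decomposes it into maximal runs (start, length, char);
--     # then pairwise length comparison over the two filtered run lists builds the set.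
--     runs = []
--     i, n = 0, len(s)
--     while i < n:
--         j = i + 1
--         while j < n and s[j] == s[i]:
--             j += 1
--         runs.append((i, j - i, s[i]))
--         i = j
--     r1 = [(st, ln) for st, ln, ch in runs if ch == c1]
--     r2 = [(st, ln) for st, ln, ch in runs if ch == c2]
--     lens = []
--     for _, ln in r1:
--         if ln not in lens:
--             lens.append(ln)
--     return {(a, b, ln) for ln in lens
--             for a, l1 in r1 if l1 == ln
--             for b, l2 in r2 if l2 == ln}
-- ===== Notes on version B (the rewrite author's own statement) =====
-- stated objective: alternative
-- what changed: A scans the string once per character building a length-keyed defaultdict for each of c1 and c2 and then emits bucket products; B decomposes the string into maximal runs in a single pass, filters that flat run list for c1 and for c2, and builds the result by direct pairwise length comparison of the two run lists with no grouping dictionary.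
import Mathlib
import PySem

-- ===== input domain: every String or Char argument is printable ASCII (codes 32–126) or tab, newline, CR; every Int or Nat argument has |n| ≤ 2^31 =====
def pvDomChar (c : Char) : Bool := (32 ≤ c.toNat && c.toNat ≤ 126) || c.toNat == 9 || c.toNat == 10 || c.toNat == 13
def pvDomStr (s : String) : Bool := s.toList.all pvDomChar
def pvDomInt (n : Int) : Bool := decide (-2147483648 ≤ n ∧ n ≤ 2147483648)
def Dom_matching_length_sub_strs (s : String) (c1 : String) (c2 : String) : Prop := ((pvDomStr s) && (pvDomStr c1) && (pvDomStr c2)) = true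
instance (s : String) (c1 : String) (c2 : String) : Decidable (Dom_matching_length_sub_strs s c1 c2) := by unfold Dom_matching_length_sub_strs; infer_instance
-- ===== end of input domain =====

-- B replaces A's two per-character scans building length-keyed defaultdicts by ONE run
-- decomposition of s plus direct pairwise length matching over the two flat run lists
-- (objective: alternative; same asymptotic cost).

-- ===== PORT A =====
-- s[i] == char  (a 1-character string compared with the string `char`)
def pvStrEq1 (c : Char) (ch : String) : Bool := String.ofList [c] == ch

-- find_ranges: the outer while over s with index i; the inner while is the takeWhile run
def pvFindRangesGo (ch : String) : List Char → Int → PySem.Dict Int (List Int) → PySem.Dict Int (List Int)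
  | [], _, d => d
  | c :: rest, i, d =>
    if pvStrEq1 c ch then
      let run := rest.takeWhile (fun x => pvStrEq1 x ch)
      let length : Int := 1 + (run.length : Int)
      let d' := d.modify length [] (fun v => v ++ [i])   -- ranges[length].append(start)
      pvFindRangesGo ch (rest.drop run.length) (i + 1 + (run.length : Int)) d'
    else
      pvFindRangesGo ch rest (i + 1) d
termination_by L => L.length
decreasing_by
  all_goals simp [List.length_drop]

def matching_length_sub_strs (s : String) (c1 : String) (c2 : String) : List (Int × Int × Int) :=
  let d1 := pvFindRangesGo c1 s.toList 0 PySem.Dict.empty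
  let d2 := pvFindRangesGo c2 s.toList 0 PySem.Dict.empty
  -- for length in c1_ranges: if length in c2_ranges: result.update({...})
  d1.items.foldl (fun res p =>
    if d2.contains p.1 then
      let starts2 := d2.getD p.1 []
      p.2.foldl (fun res a => starts2.foldl (fun res b => PySem.Set.add res (a, b, p.1)) res) res
    else res) PySem.Set.empty

-- ===== PORT B =====
-- one pass: maximal runs of s as (start, length, char)
def pvRunsGo : List Char → Int → List (Int × Int × Char)
  | [], _ => []
  | c :: rest, i =>
    let run := rest.takeWhile (fun x => x == c)
    (i, 1 + (run.length : Int), c) :: pvRunsGo (rest.drop run.length) (i + 1 + (run.length : Int))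
termination_by L => L.length
decreasing_by simp [List.length_drop]

def matching_length_sub_strs_alt (s : String) (c1 : String) (c2 : String) : List (Int × Int × Int) :=
  let runs := pvRunsGo s.toList 0
  let r1 := (runs.filter (fun r => String.ofList [r.2.2] == c1)).map (fun r => (r.1, r.2.1))
  let r2 := (runs.filter (fun r => String.ofList [r.2.2] == c2)).map (fun r => (r.1, r.2.1))
  let lens := r1.foldl (fun acc p => PySem.Set.add acc p.2) PySem.Set.empty
  lens.foldl (fun res ln =>
    r1.foldl (fun res p =>
      if p.2 == ln then
        r2.foldl (fun res q => if q.2 == ln then PySem.Set.add res (p.1, q.1, ln) else res) res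
      else res) res) PySem.Set.empty

-- ===== PRECONDITION & SPEC =====
def Spec_matching_length_sub_strs (s : String) (c1 : String) (c2 : String) (out : List (Int × Int × Int)) : Prop := out = matching_length_sub_strs_alt s c1 c2
instance (s : String) (c1 : String) (c2 : String) (out : List (Int × Int × Int)) : Decidable (Spec_matching_length_sub_strs s c1 c2 out) := by unfold Spec_matching_length_sub_strs; infer_instance

-- ===== CLAIM (what is proved, stated in full; the proofs are below) =====
def Claim_equal_matching_length_sub_strs : Prop := ∀ (s : String) (c1 : String) (c2 : String), Dom_matching_length_sub_strs s c1 c2 → Spec_matching_length_sub_strs s c1 c2 (matching_length_sub_strs s c1 c2)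

-- ===== LEMMAS AND PROOFS =====

lemma pvFindRangesGo_nil (ch : String) (i : Int) (d : PySem.Dict Int (List Int)) :
    pvFindRangesGo ch [] i d = d := by
  rw [pvFindRangesGo.eq_def]

lemma pvFindRangesGo_cons (ch : String) (c : Char) (rest : List Char) (i : Int) (d : PySem.Dict Int (List Int)) :
    pvFindRangesGo ch (c :: rest) i d =
      if pvStrEq1 c ch then
        pvFindRangesGo ch (rest.drop (rest.takeWhile (fun x => pvStrEq1 x ch)).length)
          (i + 1 + ((rest.takeWhile (fun x => pvStrEq1 x ch)).length : Int))
          (d.modify (1 + ((rest.takeWhile (fun x => pvStrEq1 x ch)).length : Int)) [] (fun v => v ++ [i]))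
      else pvFindRangesGo ch rest (i + 1) d := by
  rw [pvFindRangesGo.eq_def]

lemma pvRunsGo_nil (i : Int) : pvRunsGo [] i = [] := by
  rw [pvRunsGo.eq_def]

lemma pvRunsGo_cons (c : Char) (rest : List Char) (i : Int) :
    pvRunsGo (c :: rest) i =
      (i, 1 + ((rest.takeWhile (fun x => x == c)).length : Int), c) ::
        pvRunsGo (rest.drop (rest.takeWhile (fun x => x == c)).length)
          (i + 1 + ((rest.takeWhile (fun x => x == c)).length : Int)) := by
  rw [pvRunsGo.eq_def]

lemma pvDrop_takeWhile {α : Type} (rest : List α) (p : α → Bool) :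
    rest.dropWhile p = rest.drop (rest.takeWhile p).length := by
  induction rest with
  | nil => simp
  | cons c r ih => by_cases h : p c <;> simp [h, ih]

-- the filtered (length, start) pairs of the runs of `ch`
def pvPairs (ch : String) (rs : List (Int × Int × Char)) : List (Int × Int) :=
  (rs.filter (fun r => String.ofList [r.2.2] == ch)).map (fun r => (r.2.1, r.1))

-- A's dict builder skips characters that are not `ch` one at a time
lemma pvSkip (ch : String) (u : List Char) (hu : ∀ x ∈ u, pvStrEq1 x ch = false) :
    ∀ (rest : List Char) (i : Int) (d : PySem.Dict Int (List Int)),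
    pvFindRangesGo ch (u ++ rest) i d = pvFindRangesGo ch rest (i + (u.length : Int)) d := by
  induction u with
  | nil => intro rest i d; simp
  | cons x u ih =>
    intro rest i d
    have hx := hu x (by simp)
    rw [List.cons_append, pvFindRangesGo_cons, if_neg (by simp [hx])]
    rw [ih (fun y hy => hu y (by simp [hy])) rest (i + 1) d]
    congr 1
    simp; ring

-- A's find_ranges is the fold of the run decomposition into a length-keyed dict
lemma pvFindRangesGo_eq_runs (ch : String) :
    ∀ (n : Nat) (L : List Char), L.length ≤ n → ∀ (i : Int) (d : PySem.Dict Int (List Int)),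
    pvFindRangesGo ch L i d =
      (pvRunsGo L i).foldl
        (fun d r => if String.ofList [r.2.2] == ch then d.modify r.2.1 [] (fun v => v ++ [r.1]) else d) d := by
  intro n
  induction n with
  | zero =>
    intro L hL i d
    have : L = [] := List.length_eq_zero_iff.mp (Nat.le_zero.mp hL)
    subst this; rw [pvFindRangesGo_nil, pvRunsGo_nil]; rfl
  | succ n ih =>
    intro L hL i d
    match L with
    | [] => rw [pvFindRangesGo_nil, pvRunsGo_nil]; rfl
    | c :: rest =>
      rw [pvRunsGo_cons]
      simp only [List.foldl_cons]
      by_cases h : pvStrEq1 c ch = true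
      · have hch : String.ofList [c] = ch := by
          simpa [pvStrEq1] using h
        have hpred : (fun x => pvStrEq1 x ch) = (fun x => x == c) := by
          funext x
          rw [pvStrEq1, ← hch]
          simp [String.ext_iff]
        rw [pvFindRangesGo_cons, if_pos h]
        simp only [hpred, if_pos (show (String.ofList [c] == ch) = true by simp [hch])]
        exact ih (rest.drop (rest.takeWhile (fun x => x == c)).length)
          (by simp at hL ⊢; omega) _ _
      · -- head char does not match: A walks through the whole run one char at a time
        rw [pvFindRangesGo_cons, if_neg h]
        have hrest : rest = rest.takeWhile (fun x => x == c) ++ rest.drop (rest.takeWhile (fun x => x == c)).length := by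
          conv_lhs => rw [← List.takeWhile_append_dropWhile (p := fun x => x == c) (l := rest)]
          rw [pvDrop_takeWhile]
        have hall : ∀ x ∈ rest.takeWhile (fun x => x == c), pvStrEq1 x ch = false := by
          intro x hx
          have : x = c := by
            have := List.mem_takeWhile_imp hx
            simpa using this
          subst this
          simpa using h
        rw [if_neg (by simpa [pvStrEq1] using h)]
        conv_lhs => rw [hrest]
        rw [pvSkip ch _ hall]
        exact ih (rest.drop (rest.takeWhile (fun x => x == c)).length)
          (by simp at hL ⊢; omega) _ _

-- the dict A builds, as a fold over B's (length, start) pair list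
def pvD (ch : String) (rs : List (Int × Int × Char)) : PySem.Dict Int (List Int) :=
  (pvPairs ch rs).foldl (fun d p => d.modify p.1 [] (fun v => v ++ [p.2])) PySem.Dict.empty

lemma pvD_eq_fold (ch : String) (rs : List (Int × Int × Char)) :
    (rs.foldl (fun d r => if String.ofList [r.2.2] == ch then d.modify r.2.1 [] (fun v => v ++ [r.1]) else d)
      (PySem.Dict.empty : PySem.Dict Int (List Int))) = pvD ch rs := by
  rw [pvD, pvPairs, List.foldl_map, List.foldl_filter]

lemma pvD_getD (ch : String) (rs : List (Int × Int × Char)) (ln : Int) :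
    (pvD ch rs).getD ln [] = ((pvPairs ch rs).filter (fun p => p.1 == ln)).map (fun p => p.2) := by
  rw [pvD, PySem.Dict.getD_foldl_modify_append]
  simp [PySem.Dict.empty, PySem.Dict.getD, PySem.Dict.get?]

lemma pvD_keys (ch : String) (rs : List (Int × Int × Char)) :
    (pvD ch rs).keys = PySem.Set.ofList ((pvPairs ch rs).map (fun p => p.1)) := by
  rw [pvD, PySem.Dict.keys_foldl_modify_key (pvPairs ch rs) (fun p => p.1) [] (fun _ p => fun v => v ++ [p.2])]
  rw [PySem.Set.ofList_eq_foldl]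
  rfl

lemma pvD_keys_nodup (ch : String) (rs : List (Int × Int × Char)) :
    (pvD ch rs).keys.Nodup := by
  apply PySem.Dict.nodup_keys_foldl_modify_key (pvPairs ch rs) (fun p => p.1) [] (fun _ p => fun v => v ++ [p.2])
  simp [PySem.Dict.empty, PySem.Dict.keys]

lemma pvFoldl_const {α β : Type} (l : List α) (res : β) :
    l.foldl (fun r _ => r) res = res := by
  induction l generalizing res <;> simp [*]

-- the doubly filtered run lists both programs ultimately iterate over
def pvF (ch : String) (rs : List (Int × Int × Char)) (ln : Int) : List (Int × Int × Char) :=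
  (rs.filter (fun r => String.ofList [r.2.2] == ch)).filter (fun r => r.2.1 == ln)

lemma pvF_def (ch : String) (rs : List (Int × Int × Char)) (ln : Int) :
    pvF ch rs ln = (rs.filter (fun r => String.ofList [r.2.2] == ch)).filter (fun r => r.2.1 == ln) := rfl

lemma pvD_getD' (ch : String) (rs : List (Int × Int × Char)) (ln : Int) :
    (pvD ch rs).getD ln [] = (pvF ch rs ln).map (fun r => r.1) := by
  rw [pvD_getD, pvPairs, pvF_def, List.filter_map, List.map_map]
  rfl

-- one step of the emission loop: A's bucket step equals B's pairwise scan of the run lists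
lemma pvStep (c1 c2 : String) (rs : List (Int × Int × Char)) (ln : Int)
    (res : List (Int × Int × Int)) :
    (if (pvD c2 rs).contains ln then
        ((pvD c1 rs).getD ln []).foldl
          (fun res a => ((pvD c2 rs).getD ln []).foldl (fun res b => PySem.Set.add res (a, b, ln)) res) res
      else res)
    = ((rs.filter (fun r => String.ofList [r.2.2] == c1)).map (fun r => (r.1, r.2.1))).foldl
        (fun res p => if p.2 == ln then
            ((rs.filter (fun r => String.ofList [r.2.2] == c2)).map (fun r => (r.1, r.2.1))).foldl
              (fun res q => if q.2 == ln then PySem.Set.add res (p.1, q.1, ln) else res) res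
          else res) res := by
  rw [pvD_getD' c1, pvD_getD' c2]
  simp only [List.foldl_map, pvF, List.foldl_filter]
  by_cases hc : ln ∈ (pvPairs c2 rs).map (fun p => p.1)
  · have hcont : (pvD c2 rs).contains ln = true := by
      rw [PySem.Dict.contains_eq_decide_mem_keys, pvD_keys]
      simpa [PySem.Set.mem_ofList] using hc
    rw [if_pos hcont]
  · have hcont : ¬ (pvD c2 rs).contains ln = true := by
      rw [PySem.Dict.contains_eq_decide_mem_keys, pvD_keys]
      simpa [PySem.Set.mem_ofList] using hc
    rw [if_neg hcont]
    have hnone : ∀ y ∈ rs, (String.ofList [y.2.2] == c2) = true → (y.2.1 == ln) = true → False := by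
      intro y hymem h2 hy
      apply hc
      rw [pvPairs]
      exact List.mem_map.mpr ⟨(y.2.1, y.1),
        List.mem_map.mpr ⟨y, List.mem_filter.mpr ⟨hymem, h2⟩, rfl⟩, by simpa using (eq_of_beq hy)⟩
    refine ((pvFoldl_const rs res).symm.trans (PySem.List.foldl_congr_mem _ _ _ _ ?_))
    intro acc y _
    by_cases h1 : (String.ofList [y.2.2] == c1) = true
    · rw [if_pos h1]
      by_cases hy : (y.2.1 == ln) = true
      · rw [if_pos hy]
        refine ((pvFoldl_const rs acc).symm.trans (PySem.List.foldl_congr_mem _ _ _ _ ?_))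
        intro acc2 q hq
        by_cases h2 : (String.ofList [q.2.2] == c2) = true
        · rw [if_pos h2]
          rw [if_neg (by intro hql; exact hnone q hq h2 hql)]
        · rw [if_neg h2]
      · rw [if_neg hy]
    · rw [if_neg h1]

-- B's dedup loop builds exactly the key list of A's c1 dict
lemma pvLens (c1 : String) (rs : List (Int × Int × Char)) :
    ((rs.filter (fun r => String.ofList [r.2.2] == c1)).map (fun r => (r.1, r.2.1))).foldl
      (fun acc p => PySem.Set.add acc p.2) PySem.Set.empty
    = (pvD c1 rs).keys := by
  rw [pvD_keys, PySem.Set.ofList_eq_foldl, List.foldl_map, List.foldl_map]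
  rw [pvPairs, List.foldl_map]
  rfl

-- the whole equivalence, with both programs written out without let-bindings
lemma pvMain (c1 c2 : String) (L : List Char) :
    ((pvFindRangesGo c1 L 0 PySem.Dict.empty).items.foldl
      (fun res p => if (pvFindRangesGo c2 L 0 PySem.Dict.empty).contains p.1 then
          p.2.foldl (fun res a =>
            ((pvFindRangesGo c2 L 0 PySem.Dict.empty).getD p.1 []).foldl
              (fun res b => PySem.Set.add res (a, b, p.1)) res) res
        else res) PySem.Set.empty)
    = ((((pvRunsGo L 0).filter (fun r => String.ofList [r.2.2] == c1)).map (fun r => (r.1, r.2.1))).foldl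
        (fun acc p => PySem.Set.add acc p.2) PySem.Set.empty).foldl
        (fun res ln =>
          (((pvRunsGo L 0).filter (fun r => String.ofList [r.2.2] == c1)).map (fun r => (r.1, r.2.1))).foldl
            (fun res p => if p.2 == ln then
                (((pvRunsGo L 0).filter (fun r => String.ofList [r.2.2] == c2)).map (fun r => (r.1, r.2.1))).foldl
                  (fun res q => if q.2 == ln then PySem.Set.add res (p.1, q.1, ln) else res) res
              else res) res) PySem.Set.empty := by
  have hA : ∀ ch : String, pvFindRangesGo ch L 0 PySem.Dict.empty = pvD ch (pvRunsGo L 0) := fun ch => by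
    rw [pvFindRangesGo_eq_runs ch L.length L le_rfl]
    exact pvD_eq_fold ch (pvRunsGo L 0)
  rw [hA c1, hA c2]
  rw [PySem.Dict.items_eq_map_keys (pvD c1 (pvRunsGo L 0)) (pvD_keys_nodup c1 _) []]
  rw [List.foldl_map]
  rw [pvLens c1 (pvRunsGo L 0)]
  refine PySem.List.foldl_congr_mem _ _ _ _ ?_
  intro res ln _
  exact pvStep c1 c2 (pvRunsGo L 0) ln res

-- ===== VERDICT (by name: the statement is the Claim_ definition above) =====
theorem matching_length_sub_strs_spec : Claim_equal_matching_length_sub_strs := by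
  intro s c1 c2 _
  exact pvMain c1 c2 s.toList
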